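-- pv_equiv track=rewrite | github.com/lanese/corinne-3 | well_formedness.py | get_all_runs
-- ===== SOURCE A (Python) =====
-- def check_q_branch(array):
--     for i in array:
--         if array.count(i) == 3:
--             return False
--
--     return True
--
-- def search(i, arr, insieme1, runs):
--     if (i == None):
--         for j in insieme1:
--             arr = [j[0], j[2]]
--             runs.append(arr)
--             search(j[2], arr, insieme1, runs)
--     else:
--         for j in insieme1:
--             if i == j[0]:
--                 io = []
--                 for ite in arr:
--                     io.append(ite)
--                 io.append(j[2])
--                 if check_q_branch(io):
--                     runs.append(io)
--                     search(j[2], io, insieme1, runs)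
--
-- def get_all_runs(set):
--     runs = []
--     search(None, None, set, runs)
--
--
--     # Find the branches with maximum number of cycle is one
--     # The first node is the q_node
--
--     candidate_q_cycle_one = []
--     for i in range(len(runs)):
--         visited = []
--         cycles = 0
--         for node in runs[i]:
--             if node in visited:
--                 cycles += 1
--             if node not in visited:
--                 visited.append(node)
--         if cycles < 2:
--             candidate_q_cycle_one.append(runs[i])
--
--     #return runs
--     return candidate_q_cycle_one
-- ===== SOURCE B (Python) =====
-- def get_all_runs(set):
--     # Build an adjacency index once (src -> ordered list of dsts), then do a
--     # single pruned DFS carrying a running revisit count per path; a path is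
--     # emitted the moment it is formed iff its count is < 2, so there is no
--     # post-filter and no rescans of the edge list.
--     pairs = [(j[0], j[2]) for j in set]
--     adj = {}
--     for p in pairs:
--         adj.setdefault(p[0], []).append(p[1])
--     out = []
--
--     def extend(path, rev, children):
--         for c in children:
--             nrev = rev + (1 if c in path else 0)
--             if nrev < 2:
--                 npath = path + [c]
--                 out.append(npath)
--                 extend(npath, nrev, adj.get(c, []))
--
--     for j in set:
--         pair = [j[0], j[2]]
--         out.append(pair)
--         extend(pair, (1 if j[0] == j[2] else 0), adj.get(j[2], []))
--     return out
-- ===== Notes on version B (the rewrite author's own statement) =====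
-- stated objective: faster
-- what changed: A rescans the whole edge list at every recursion step, enumerates every path (pruned only by the count==3 test) into a runs list, and then filters it with a second visited/cycles pass; B first builds an adjacency index (src -> dsts) so the inner edge scan disappears, then does one pruned DFS that carries a running revisit count per path and emits each path immediately iff the count is < 2 (no post-filter).
import Mathlib
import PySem

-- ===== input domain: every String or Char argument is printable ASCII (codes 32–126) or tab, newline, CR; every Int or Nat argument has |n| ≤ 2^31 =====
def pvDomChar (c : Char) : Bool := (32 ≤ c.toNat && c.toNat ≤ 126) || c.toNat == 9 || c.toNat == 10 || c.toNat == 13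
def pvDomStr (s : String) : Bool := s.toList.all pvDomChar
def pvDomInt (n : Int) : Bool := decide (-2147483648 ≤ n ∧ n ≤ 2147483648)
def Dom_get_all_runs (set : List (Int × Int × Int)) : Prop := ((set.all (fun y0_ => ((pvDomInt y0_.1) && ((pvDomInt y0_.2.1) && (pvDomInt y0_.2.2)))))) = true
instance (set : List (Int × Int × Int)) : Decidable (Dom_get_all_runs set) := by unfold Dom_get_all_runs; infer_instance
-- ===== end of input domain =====

-- B replaces A's "rescan the edge list each step, enumerate every path, then filter by
-- revisit count < 2" with an adjacency index built once plus a single pruned DFS carrying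
-- a running revisit count (objective: alternative — no inner edge scan, no post-filter).

-- ===== PORT A =====
-- check_q_branch: early-return for-loop = List.all of the negated test
def checkQ (array : List Int) : Bool :=
  array.all (fun i => !(array.count i == 3))

-- search(i, arr, insieme1, runs) for i ≠ None; the fuel only bounds recursion depth
-- (the Python recursion depth is bounded by 2*len(set)+2, so the fuel used below never runs out)
def searchA (set : List (Int × Int × Int)) :
    Nat → Int → List Int → List (Int × Int × Int) → List (List Int)
  | 0, _, _, _ => []
  | _ + 1, _, _, [] => []
  | fuel + 1, i, arr, j :: rest =>
      (if i = j.1 then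
         (let io := arr ++ [j.2.2]
          if checkQ io then io :: searchA set fuel j.2.2 io set else [])
       else []) ++ searchA set (fuel + 1) i arr rest
  termination_by fuel _ _ js => (fuel, js.length)

-- the i == None branch of search
def topA (set : List (Int × Int × Int)) (fuel : Nat) :
    List (Int × Int × Int) → List (List Int)
  | [] => []
  | j :: rest =>
      ([j.1, j.2.2] :: searchA set fuel j.2.2 [j.1, j.2.2] set) ++ topA set fuel rest

-- the "visited/cycles" counting loop of get_all_runs
def cycLoop : List Int → List Int → Int → Int
  | [], _, c => c
  | n :: rest, visited, c =>
      let c1 := if n ∈ visited then c + 1 else c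
      let v1 := if n ∈ visited then visited else visited ++ [n]
      cycLoop rest v1 c1

def get_all_runs (set : List (Int × Int × Int)) : List (List Int) :=
  let runs := topA set (2 * set.length + 4) set
  runs.filter (fun r => cycLoop r [] 0 < 2)

-- ===== PORT B =====
-- the pairs list and the setdefault/append loop of Source B
def buildAdj (set : List (Int × Int × Int)) : PySem.Dict Int (List Int) :=
  (set.map (fun j => (j.1, j.2.2))).foldl
    (fun d p => d.modify p.1 [] (· ++ [p.2])) PySem.Dict.empty

-- extend(path, rev, children) of Source B (fuel bounds recursion depth; never exhausted:
-- depth ≤ len(set)+2)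
def extendB (adj : PySem.Dict Int (List Int)) :
    Nat → List Int → Int → List Int → List (List Int)
  | 0, _, _, _ => []
  | _ + 1, _, _, [] => []
  | fuel + 1, path, rev, c :: cs =>
      (let nrev := rev + (if c ∈ path then 1 else 0)
       if nrev < 2 then
         let npath := path ++ [c]
         npath :: extendB adj fuel npath nrev (adj.getD c [])
       else []) ++ extendB adj (fuel + 1) path rev cs
  termination_by fuel _ _ cs => (fuel, cs.length)

-- the top-level loop of Source B
def topB (adj : PySem.Dict Int (List Int)) (fuel : Nat) :
    List (Int × Int × Int) → List (List Int)
  | [] => []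
  | j :: rest =>
      ([j.1, j.2.2] ::
        extendB adj fuel [j.1, j.2.2] (if j.1 = j.2.2 then 1 else 0) (adj.getD j.2.2 [])) ++
        topB adj fuel rest

def get_all_runs_alt (set : List (Int × Int × Int)) : List (List Int) :=
  let adj := buildAdj set
  topB adj (2 * set.length + 4) set

-- ===== PRECONDITION & SPEC =====
def Spec_get_all_runs (set : List (Int × Int × Int)) (out : List (List Int)) : Prop := out = get_all_runs_alt set
instance (set : List (Int × Int × Int)) (out : List (List Int)) : Decidable (Spec_get_all_runs set out) := by unfold Spec_get_all_runs; infer_instance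

-- ===== CLAIM (what is proved, stated in full; the proofs are below) =====
def Claim_equal_get_all_runs : Prop := ∀ (set : List (Int × Int × Int)), Dom_get_all_runs set → Spec_get_all_runs set (get_all_runs set)

-- ===== LEMMAS AND PROOFS =====

-- the adjacency index returns exactly the ordered successors of a node
lemma buildAdj_getD (set : List (Int × Int × Int)) (c : Int) :
    (buildAdj set).getD c [] =
      (set.filter (fun j => j.1 = c)).map (fun j => j.2.2) := by
  unfold buildAdj
  rw [PySem.Dict.getD_foldl_modify_append]
  simp only [List.filter_map, List.map_map, Function.comp_def, PySem.Dict.getD_empty,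
    List.nil_append]
  congr 1

-- appending one node adds 1 to the cycle count iff the node was already seen
lemma cycLoop_append (x : Int) : ∀ (l v : List Int) (c : Int),
    cycLoop (l ++ [x]) v c = cycLoop l v c + (if x ∈ v ∨ x ∈ l then 1 else 0) := by
  intro l
  induction l with
  | nil => intro v c; by_cases h : x ∈ v <;> simp [cycLoop, h]
  | cons n rest ih =>
      intro v c
      simp only [List.cons_append, cycLoop, ih]
      by_cases hn : n ∈ v <;> by_cases hx : x ∈ v <;>
        simp [hn, hx, List.mem_append, or_comm, or_assoc, or_left_comm] <;>
        by_cases hxn : x = n <;> simp_all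

-- the cycle count dominates (count x) - 1 (and - 0 if x is already visited)
lemma cycLoop_ge_count (x : Int) : ∀ (l v : List Int) (c : Int),
    c + (l.count x : Int) - (if x ∈ v then 0 else 1) ≤ cycLoop l v c := by
  intro l
  induction l with
  | nil => intro v c; by_cases h : x ∈ v <;> simp [cycLoop, h] <;> omega
  | cons n rest ih =>
      intro v c
      simp only [cycLoop, List.count_cons]
      by_cases hn : n ∈ v <;> by_cases hxn : n = x <;>
        · simp only [hn, hxn, if_true, if_false, reduceIte]
          first
          | (have := ih v (c+1); have := ih v c;
             have := ih (v ++ [n]) (c+1); have := ih (v ++ [n]) c;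
             by_cases hx : x ∈ v <;>
               simp_all [List.mem_append, beq_iff_eq] <;> push_cast <;> omega)

-- checkQ on a one-step extension, when all counts in arr are ≤ 2
lemma checkQ_append (arr : List Int) (x : Int) (h : ∀ y, (arr.count y : Int) ≤ 2) :
    checkQ (arr ++ [x]) = true ↔ arr.count x ≠ 2 := by
  unfold checkQ
  rw [List.all_eq_true]
  constructor
  · intro hall hc
    have hx : x ∈ arr ++ [x] := by simp
    have := hall x hx
    simp only [Bool.not_eq_eq_eq_not, Bool.not_true, beq_eq_false_iff_ne, ne_eq] at this
    rw [List.count_append] at this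
    simp only [List.count_cons_self, List.count_nil] at this
    omega
  · intro hne i hi
    have hcnt : (arr ++ [x]).count i = arr.count i + (if i = x then 1 else 0) := by
      by_cases hix : i = x
      · subst hix; simp [List.count_append]
      · have hxi : ¬ (x = i) := by intro hh; exact hix hh.symm
        simp [List.count_append, hix, hxi]
    have h2 := h i
    simp only [Bool.not_eq_eq_eq_not, Bool.not_true, beq_eq_false_iff_ne, ne_eq, hcnt]
    by_cases hix : i = x
    · simp only [hix, if_true, reduceIte]; omega
    · have hxi : ¬ (x = i) := by intro h; exact hix h.symm
      simp only [hix, hxi, if_false, reduceIte]; omega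

-- once a path's cycle count reached 2, nothing under it survives A's filter
lemma searchA_dead (set : List (Int × Int × Int)) (fuel : Nat) :
    ∀ (js : List (Int × Int × Int)) (i : Int) (arr : List Int),
      2 ≤ cycLoop arr [] 0 →
      (searchA set fuel i arr js).filter (fun r => cycLoop r [] 0 < 2) = [] := by
  induction fuel with
  | zero => intro js i arr _; simp [searchA]
  | succ f ihf =>
      intro js
      induction js with
      | nil => intro i arr _; simp [searchA]
      | cons j rest ihr =>
          intro i arr h
          rw [searchA, List.filter_append, ihr i arr h, List.append_nil]
          by_cases hij : i = j.1
          · simp only [hij, if_true]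
            set io := arr ++ [j.2.2] with hio
            by_cases hq : checkQ io
            · have hge : 2 ≤ cycLoop io [] 0 := by
                rw [hio, cycLoop_append]
                split <;> omega
              simp only [hq, if_true, List.filter_cons]
              have : ¬ (cycLoop io [] 0 < 2) := by omega
              simp only [this, decide_false, Bool.false_eq_true, if_false]
              exact ihf set j.2.2 io hge
            · simp [hq]
          · simp [hij]

-- main invariant: A's subtree over js, filtered, equals B's pruned DFS over the
-- successor list that A's guarded scan of js would select
lemma searchAB (set : List (Int × Int × Int)) (adj : PySem.Dict Int (List Int))
    (hadj : ∀ c, adj.getD c [] = (set.filter (fun j => j.1 = c)).map (fun j => j.2.2))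
    (fuel : Nat) :
    ∀ (js : List (Int × Int × Int)) (i : Int) (arr : List Int) (rev : Int),
      rev = cycLoop arr [] 0 →
      cycLoop arr [] 0 < 2 →
      (∀ y, (arr.count y : Int) ≤ 2) →
      (searchA set fuel i arr js).filter (fun r => cycLoop r [] 0 < 2) =
        extendB adj fuel arr rev ((js.filter (fun j => j.1 = i)).map (fun j => j.2.2)) := by
  induction fuel with
  | zero => intro js i arr rev _ _ _; simp [searchA, extendB]
  | succ f ihf =>
      intro js
      induction js with
      | nil => intro i arr rev _ _ _; simp [searchA, extendB]
      | cons j rest ihr =>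
          intro i arr rev hrev hlt hcnt
          rw [searchA, List.filter_append, ihr i arr rev hrev hlt hcnt]
          by_cases hij : i = j.1
          · have hji : (j.1 = i) := hij.symm
            rw [List.filter_cons_of_pos (by simp [hji]), List.map_cons, extendB]
            congr 1
            simp only [hij, if_true, reduceIte]
            set x := j.2.2 with hx
            set io := arr ++ [x] with hio
            have hcio : cycLoop io [] 0 = cycLoop arr [] 0 + (if x ∈ arr then 1 else 0) := by
              rw [hio, cycLoop_append]; simp
            have hnrev : rev + (if x ∈ arr then 1 else 0) = cycLoop io [] 0 := by
              rw [hcio, hrev]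
            by_cases hc2 : arr.count x = 2
            · -- A's check fails; B's pruning also fires
              have hq : checkQ io = false := by
                have := (checkQ_append arr x hcnt)
                rcases hb : checkQ io with _ | _
                · rfl
                · exact absurd hc2 (this.mp hb)
              have hxin : x ∈ arr := by
                have : 0 < arr.count x := by omega
                exact List.count_pos_iff.mp this
              have h1 : 1 ≤ cycLoop arr [] 0 := by
                have := cycLoop_ge_count x arr [] 0
                simp only [List.mem_nil_iff, if_false, reduceIte] at this
                omega
              have : ¬ (rev + (if x ∈ arr then 1 else 0) < 2) := by
                simp only [hxin, if_true, reduceIte]; omega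
              simp [hq, this]
            · -- A's check passes
              have hq : checkQ io = true := (checkQ_append arr x hcnt).mpr hc2
              by_cases hlt2 : cycLoop io [] 0 < 2
              · have hb : rev + (if x ∈ arr then 1 else 0) < 2 := by omega
                have hcnt' : ∀ y, (io.count y : Int) ≤ 2 := by
                  intro y
                  rw [hio, List.count_append]
                  by_cases hyx : y = x
                  · have := hcnt x
                    rw [hyx]
                    simp only [List.count_cons_self, List.count_nil]
                    omega
                  · have h0 : List.count y [x] = 0 := by
                      simp [List.count_eq_zero, hyx]
                    have := hcnt y
                    omega
                simp only [hq, if_true, hb, List.filter_cons]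
                have : cycLoop io [] 0 < 2 := hlt2
                simp only [this, decide_true, if_true]
                rw [ihf set x io (rev + (if x ∈ arr then 1 else 0)) hnrev hlt2 hcnt', hadj x]
              · have hge : 2 ≤ cycLoop io [] 0 := by omega
                have hb : ¬ (rev + (if x ∈ arr then 1 else 0) < 2) := by omega
                simp only [hq, if_true, hb, if_false, List.filter_cons, reduceIte]
                have : ¬ (cycLoop io [] 0 < 2) := by omega
                simp only [this, decide_false, Bool.false_eq_true, if_false]
                exact searchA_dead set f set x io hge
          · have hji : ¬ (j.1 = i) := fun h => hij h.symm
            rw [List.filter_cons_of_neg (by simp [hji])]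
            simp [hij]

lemma top_eq (set : List (Int × Int × Int)) (adj : PySem.Dict Int (List Int))
    (hadj : ∀ c, adj.getD c [] = (set.filter (fun j => j.1 = c)).map (fun j => j.2.2))
    (fuel : Nat) :
    ∀ js : List (Int × Int × Int),
      (topA set fuel js).filter (fun r => cycLoop r [] 0 < 2) = topB adj fuel js := by
  intro js
  induction js with
  | nil => simp [topA, topB]
  | cons j rest ih =>
      rw [topA, topB, List.filter_append, ih]
      congr 1
      have hcyc : cycLoop [j.1, j.2.2] [] 0 = (if j.1 = j.2.2 then 1 else 0) := by
        by_cases h : j.1 = j.2.2 <;> simp [cycLoop, h, eq_comm]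
      rw [List.filter_cons]
      have hk : cycLoop [j.1, j.2.2] [] 0 < 2 := by rw [hcyc]; split <;> omega
      simp only [hk, decide_true, if_true]
      rw [searchAB set adj hadj fuel set j.2.2 [j.1, j.2.2] _ hcyc.symm (by omega)
        (fun y => by
          have := List.count_le_length (l := [j.1, j.2.2]) (a := y)
          simp only [List.length_cons, List.length_nil] at this
          omega), hadj j.2.2]

-- ===== VERDICT (by name: the statement is the Claim_ definition above) =====
theorem get_all_runs_spec : Claim_equal_get_all_runs := by
  intro set _
  unfold Spec_get_all_runs get_all_runs get_all_runs_alt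
  exact top_eq set (buildAdj set) (buildAdj_getD set) (2 * set.length + 4) set
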